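-- pv_equiv track=rewrite | github.com/luizademelo/TP-MES | grpc-no-comments/src/python/grpcio_tests/tests/unit/test_common.py | metadata_transmitted
-- ===== SOURCE A (Python) =====
-- import collections
--
-- def metadata_transmitted(original_metadata, transmitted_metadata):
--     """Judges whether or not metadata was acceptably transmitted.
--
--     gRPC is allowed to insert key-value pairs into the metadata values given by
--     applications and to reorder key-value pairs with different keys but it is not
--     allowed to alter existing key-value pairs or to reorder key-value pairs with
--     the same key.
--
--     Args:
--       original_metadata: A metadata value used in a test of gRPC. An iterable over
--         iterables of length 2.
--       transmitted_metadata: A metadata value corresponding to original_metadata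
--         after having been transmitted via gRPC. An iterable over iterables of
--         length 2.
--
--     Returns:
--        A boolean indicating whether transmitted_metadata accurately reflects
--         original_metadata after having been transmitted via gRPC.
--     """
--     original = collections.defaultdict(list)
--     for key, value in original_metadata:
--         original[key].append(value)
--     transmitted = collections.defaultdict(list)
--     for key, value in transmitted_metadata:
--         transmitted[key].append(value)
--
--     for key, values in original.items():
--         transmitted_values = transmitted[key]
--         transmitted_iterator = iter(transmitted_values)
--         try:
--             for value in values:
--                 while True:
--                     transmitted_value = next(transmitted_iterator)
--                     if value == transmitted_value:
--                         break
--         except StopIteration: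
--             return False
--     else:
--         return True
-- ===== SOURCE B (Python) =====
-- def metadata_transmitted(original_metadata, transmitted_metadata):
--     # Streaming greedy subsequence check: one forward pass over transmitted_metadata,
--     # popping the head of each key's remaining expected values on a match.
--     remaining = {}
--     for key, value in original_metadata:
--         remaining.setdefault(key, []).append(value)
--     for key, value in transmitted_metadata:
--         values = remaining.get(key)
--         if values and values[0] == value:
--             values.pop(0)
--     return all(not values for values in remaining.values())
-- ===== Notes on version B (the rewrite author's own statement) =====
-- stated objective: alternative
-- what changed: Instead of grouping transmitted_metadata into per-key lists and running a per-key iterator scan, B makes a single streaming pass over transmitted_metadata, popping the head of each key's remaining expected-value queue on a match, and returns True iff every queue is emptied.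
import Mathlib
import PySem

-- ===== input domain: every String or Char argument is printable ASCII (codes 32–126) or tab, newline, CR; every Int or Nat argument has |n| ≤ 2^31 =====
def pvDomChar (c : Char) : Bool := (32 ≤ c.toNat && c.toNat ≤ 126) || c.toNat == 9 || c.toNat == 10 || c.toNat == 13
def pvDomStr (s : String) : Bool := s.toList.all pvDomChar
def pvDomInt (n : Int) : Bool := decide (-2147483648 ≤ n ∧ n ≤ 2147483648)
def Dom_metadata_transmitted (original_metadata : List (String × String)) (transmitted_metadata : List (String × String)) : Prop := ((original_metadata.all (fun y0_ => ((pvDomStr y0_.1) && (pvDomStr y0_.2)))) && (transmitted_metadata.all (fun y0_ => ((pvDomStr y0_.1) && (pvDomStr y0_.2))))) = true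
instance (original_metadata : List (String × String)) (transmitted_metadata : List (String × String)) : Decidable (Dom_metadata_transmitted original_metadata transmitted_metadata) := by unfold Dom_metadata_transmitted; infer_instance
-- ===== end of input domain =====

-- B replaces A's group-transmitted-then-scan-per-key-with-an-iterator check by a single
-- streaming pass over transmitted_metadata with per-key remaining-value queues (alternative
-- decomposition, same cost). B's Python mutates only its own local dict.


-- ===== PORT A =====
-- 'while True: transmitted_value = next(it); if value == transmitted_value: break':
-- skip stream elements until one equals v; none = StopIteration.
def pvSkipToA (v : String) : List String → Option (List String)
  | [] => none
  | t :: ts => if t = v then some ts else pvSkipToA v ts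

-- the 'for value in values' loop over the per-key iterator; False on StopIteration.
def pvMatchA : List String → List String → Bool
  | [], _ => true
  | v :: vs, ts =>
    match pvSkipToA v ts with
    | none => false
    | some rest => pvMatchA vs rest

-- defaultdict(list) + 'original[key].append(value)' grouping loop (same for transmitted).
def metadata_transmitted (original_metadata : List (String × String)) (transmitted_metadata : List (String × String)) : Bool :=
  let original := original_metadata.foldl (fun d p => d.modify p.1 [] (· ++ [p.2])) PySem.Dict.empty
  let transmitted := transmitted_metadata.foldl (fun d p => d.modify p.1 [] (· ++ [p.2])) PySem.Dict.empty
  -- 'for key, values in original.items(): …' returning False at the first failing key;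
  -- 'transmitted[key]' on a defaultdict reads [] for a missing key (getD; the defaultdict's
  -- insertion of the [] entry is unobservable afterwards).
  original.items.all (fun kv => pvMatchA kv.2 (transmitted.getD kv.1 []))

-- ===== PORT B =====
-- one streaming step: if the key is tracked and its queue's head equals the value, pop it.
def pvStepB (rem : PySem.Dict String (List String)) (p : String × String) : PySem.Dict String (List String) :=
  match rem.get? p.1 with
  | some (v :: vs) => if v = p.2 then rem.insert p.1 vs else rem
  | _ => rem

def metadata_transmitted_alt (original_metadata : List (String × String)) (transmitted_metadata : List (String × String)) : Bool :=
  let remaining := original_metadata.foldl (fun d p => d.modify p.1 [] (· ++ [p.2])) PySem.Dict.empty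
  let final := transmitted_metadata.foldl pvStepB remaining
  final.values.all (·.isEmpty)

-- ===== PRECONDITION & SPEC =====
def Spec_metadata_transmitted (original_metadata : List (String × String)) (transmitted_metadata : List (String × String)) (out : Bool) : Prop := out = metadata_transmitted_alt original_metadata transmitted_metadata
instance (original_metadata : List (String × String)) (transmitted_metadata : List (String × String)) (out : Bool) : Decidable (Spec_metadata_transmitted original_metadata transmitted_metadata out) := by unfold Spec_metadata_transmitted; infer_instance

-- ===== CLAIM (what is proved, stated in full; the proofs are below) =====
def Claim_equal_metadata_transmitted : Prop := ∀ (original_metadata : List (String × String)) (transmitted_metadata : List (String × String)), Dom_metadata_transmitted original_metadata transmitted_metadata → Spec_metadata_transmitted original_metadata transmitted_metadata (metadata_transmitted original_metadata transmitted_metadata)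

-- ===== LEMMAS AND PROOFS =====

-- one-element residue step on a single key's queue
def pvStep1 (vs : List String) (w : String) : List String :=
  match vs with
  | [] => []
  | v :: vs' => if v = w then vs' else v :: vs'

-- A's iterator match succeeds iff the left-fold residue of the stream is empty
theorem pvMatchA_eq_residue (ws : List String) : ∀ vs : List String,
    pvMatchA vs ws = (ws.foldl pvStep1 vs).isEmpty := by
  induction ws with
  | nil => intro vs; cases vs <;> simp [pvMatchA, pvSkipToA]
  | cons w ws ih =>
    intro vs
    cases vs with
    | nil =>
      rw [List.foldl_cons]
      have h1 : pvStep1 [] w = [] := rfl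
      rw [h1, ← ih []]
      rfl
    | cons v vs' =>
      by_cases hv : v = w
      · subst hv
        simp [pvMatchA, pvSkipToA, List.foldl_cons, pvStep1, ih vs']
      · have hw : ¬ (w = v) := fun h => hv h.symm
        simp only [pvMatchA, pvSkipToA, if_neg hw, List.foldl_cons, pvStep1, if_neg hv]
        exact ih (v :: vs')

-- one B step, seen through get?
theorem pvStepB_get? (d : PySem.Dict String (List String)) (pk pw : String) (k : String) :
    (pvStepB d (pk, pw)).get? k =
      if k = pk then (d.get? k).map (fun vs => pvStep1 vs pw) else d.get? k := by
  unfold pvStepB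
  by_cases hk : k = pk
  · subst hk
    cases hd : d.get? k with
    | none => simp [hd]
    | some vs =>
      cases vs with
      | nil => simp [hd, pvStep1]
      | cons v vs' =>
        by_cases hv : v = pw
        · simp [hv, PySem.Dict.get?_insert_self, pvStep1]
        · simp [hd, hv, pvStep1]
  · cases hd : d.get? pk with
    | none => simp [hk]
    | some vs =>
      cases vs with
      | nil => simp [hk]
      | cons v vs' =>
        by_cases hv : v = pw
        · simp [hv, hk, PySem.Dict.get?_insert_of_ne _ _ hk]
        · simp [hv, hk]

-- B's whole streaming pass, seen through get?: per-key residue over the key's filtered stream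
theorem pvFoldB_get? (t : List (String × String)) : ∀ (d : PySem.Dict String (List String)) (k : String),
    (t.foldl pvStepB d).get? k =
      (d.get? k).map (fun vs => ((t.filter (fun p => p.1 == k)).map (·.2)).foldl pvStep1 vs) := by
  induction t with
  | nil => intro d k; cases h : d.get? k <;> simp [h]
  | cons p t ih =>
    intro d k
    obtain ⟨pk, pw⟩ := p
    rw [List.foldl_cons, ih (pvStepB d (pk, pw)) k, pvStepB_get?]
    by_cases hk : k = pk
    · subst hk
      simp only [List.filter_cons, beq_self_eq_true, if_true, List.map_cons, List.foldl_cons]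
      cases d.get? k <;> simp
    · have hne : (pk == k) = false := by simpa using fun h => hk h.symm
      simp [hne, hk]

-- B's pass never changes the key list
theorem pvFoldB_keys (t : List (String × String)) : ∀ d : PySem.Dict String (List String),
    (t.foldl pvStepB d).keys = d.keys := by
  induction t with
  | nil => intro d; rfl
  | cons p t ih =>
    intro d
    rw [List.foldl_cons, ih]
    unfold pvStepB
    cases hd : d.get? p.1 with
    | none => rfl
    | some vs =>
      cases vs with
      | nil => rfl
      | cons v vs' =>
        by_cases hv : v = p.2
        · simp only [hv, if_true]
          apply PySem.Dict.keys_insert_of_contains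
          rw [PySem.Dict.contains_eq_isSome_get?, hd]; rfl
        · simp [hv]

theorem metadata_transmitted_spec : Claim_equal_metadata_transmitted := by
  intro o t _
  unfold Spec_metadata_transmitted
  simp only [metadata_transmitted, metadata_transmitted_alt]
  set g := fun (l : List (String × String)) =>
      l.foldl (fun d p => d.modify p.1 [] (· ++ [p.2])) PySem.Dict.empty with hg
  have hnodup : (g o).keys.Nodup := by
    rw [hg]
    exact PySem.Dict.nodup_keys_foldl_modify_key o Prod.fst [] (fun d p => (· ++ [p.2])) _
      PySem.Dict.nodup_keys_empty
  have hfkeys : (t.foldl pvStepB (g o)).keys = (g o).keys := pvFoldB_keys t (g o)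
  have hfnodup : (t.foldl pvStepB (g o)).keys.Nodup := hfkeys ▸ hnodup
  rw [PySem.Dict.values_eq_map_keys _ hfnodup [],
      PySem.Dict.items_eq_map_keys _ hnodup [], hfkeys, List.all_map, List.all_map]
  refine List.all_congr rfl ?_
  intro k
  simp only [Function.comp]
  have htv : (t.foldl (fun d p => d.modify p.1 [] (· ++ [p.2])) PySem.Dict.empty).getD k [] =
      (t.filter (fun p => p.1 == k)).map (·.2) := by
    simpa using PySem.Dict.getD_foldl_modify_append t PySem.Dict.empty k
  cases hgvs : (g o).get? k with
  | none =>
    have hog : (g o).getD k [] = [] := by rw [PySem.Dict.getD_eq_get?_getD, hgvs]; rfl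
    have hfin : (t.foldl pvStepB (g o)).getD k [] = [] := by
      rw [PySem.Dict.getD_eq_get?_getD, pvFoldB_get?, hgvs]; rfl
    simp [hog, hfin, pvMatchA]
  | some gvs =>
    have hog : (g o).getD k [] = gvs := by rw [PySem.Dict.getD_eq_get?_getD, hgvs]; rfl
    have hfin : (t.foldl pvStepB (g o)).getD k [] =
        ((t.filter (fun p => p.1 == k)).map (·.2)).foldl pvStep1 gvs := by
      rw [PySem.Dict.getD_eq_get?_getD, pvFoldB_get?, hgvs]; rfl
    simp only [hog, htv, hfin]
    exact pvMatchA_eq_residue _ gvs
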